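-- pv_equiv track=rewrite | github.com/erikbr01/policy_doctor | third_party/influence_visualizer/plotting/common.py | get_action_labels
-- ===== SOURCE A (Python) =====
-- from typing import Dict, List, Tuple
--
-- def get_action_labels(action_dim: int) -> List[str]:
--     """Get semantic labels for action dimensions.
--
--     For robomimic with abs_action=True and rotation_6d:
--     - 10D single arm: pos(3) + rotation_6d(6) + gripper(1)
--     - 20D dual arm: 2 * [pos(3) + rotation_6d(6) + gripper(1)]
--
--     Args:
--         action_dim: Total number of action dimensions
--
--     Returns:
--         List of labels for each dimension
--     """
--     if action_dim == 10:
--         # Single arm with rotation_6d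
--         return [
--             "pos_x",
--             "pos_y",
--             "pos_z",
--             "rot_0",
--             "rot_1",
--             "rot_2",
--             "rot_3",
--             "rot_4",
--             "rot_5",
--             "gripper",
--         ]
--     elif action_dim == 20:
--         # Dual arm with rotation_6d
--         labels = []
--         for arm in ["arm0", "arm1"]:
--             labels.extend(
--                 [
--                     f"{arm}_pos_x",
--                     f"{arm}_pos_y",
--                     f"{arm}_pos_z",
--                     f"{arm}_rot_0",
--                     f"{arm}_rot_1",
--                     f"{arm}_rot_2",
--                     f"{arm}_rot_3",
--                     f"{arm}_rot_4",
--                     f"{arm}_rot_5",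
--                     f"{arm}_gripper",
--                 ]
--             )
--         return labels
--     elif action_dim == 7:
--         # Single arm with axis_angle (raw)
--         return [
--             "pos_x",
--             "pos_y",
--             "pos_z",
--             "axis_angle_x",
--             "axis_angle_y",
--             "axis_angle_z",
--             "gripper",
--         ]
--     elif action_dim == 14:
--         # Dual arm with axis_angle (raw)
--         labels = []
--         for arm in ["arm0", "arm1"]:
--             labels.extend(
--                 [
--                     f"{arm}_pos_x",
--                     f"{arm}_pos_y",
--                     f"{arm}_pos_z",
--                     f"{arm}_axis_angle_x",
--                     f"{arm}_axis_angle_y",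
--                     f"{arm}_axis_angle_z",
--                     f"{arm}_gripper",
--                 ]
--             )
--         return labels
--     else:
--         # Unknown format, use generic labels
--         return [f"dim_{i}" for i in range(action_dim)]
-- ===== SOURCE B (Python) =====
-- def get_action_labels(action_dim: int):
--     table = {10: ("rot6d", 1), 20: ("rot6d", 2), 7: ("axis_angle", 1), 14: ("axis_angle", 2)}
--     if action_dim not in table:
--         # Unknown format, use generic labels
--         return [f"dim_{i}" for i in range(action_dim)]
--     rotation, num_arms = table[action_dim]
--     if rotation == "rot6d":
--         rot_block = [f"rot_{i}" for i in range(6)]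
--     else:
--         rot_block = ["axis_angle_x", "axis_angle_y", "axis_angle_z"]
--     suffixes = ["pos_x", "pos_y", "pos_z"] + rot_block + ["gripper"]
--     if num_arms == 1:
--         return suffixes
--     return [f"{arm}_{s}" for arm in ["arm0", "arm1"] for s in suffixes]
-- ===== Notes on version B (the rewrite author's own statement) =====
-- stated objective: simpler
-- what changed: Replaces the four hard-coded branch bodies with a table mapping action_dim to (rotation, num_arms), builds one per-arm suffix list from shared pieces, and prefixes it per arm only for dual-arm dims.
import Mathlib
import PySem

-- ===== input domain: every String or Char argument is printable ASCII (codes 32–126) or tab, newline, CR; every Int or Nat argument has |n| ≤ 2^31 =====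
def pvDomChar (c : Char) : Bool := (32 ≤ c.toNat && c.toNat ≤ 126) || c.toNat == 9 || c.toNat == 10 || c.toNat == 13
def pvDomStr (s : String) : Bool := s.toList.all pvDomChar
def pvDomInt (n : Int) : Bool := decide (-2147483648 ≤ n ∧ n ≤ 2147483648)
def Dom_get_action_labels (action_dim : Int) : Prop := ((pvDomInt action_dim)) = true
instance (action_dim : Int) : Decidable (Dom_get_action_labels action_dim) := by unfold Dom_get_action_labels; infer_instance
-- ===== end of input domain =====

-- B replaces A's four hard-coded branch bodies by a (rotation, num_arms) table and one shared
-- suffix list prefixed per arm; objective: simpler.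

-- ===== PORT A =====
def get_action_labels (action_dim : Int) : List String :=
  if action_dim = 10 then
    ["pos_x", "pos_y", "pos_z", "rot_0", "rot_1", "rot_2", "rot_3", "rot_4", "rot_5", "gripper"]
  else if action_dim = 20 then
    ["arm0", "arm1"].foldl (fun labels arm =>
      labels ++ [arm ++ "_pos_x", arm ++ "_pos_y", arm ++ "_pos_z",
                 arm ++ "_rot_0", arm ++ "_rot_1", arm ++ "_rot_2",
                 arm ++ "_rot_3", arm ++ "_rot_4", arm ++ "_rot_5",
                 arm ++ "_gripper"]) []
  else if action_dim = 7 then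
    ["pos_x", "pos_y", "pos_z", "axis_angle_x", "axis_angle_y", "axis_angle_z", "gripper"]
  else if action_dim = 14 then
    ["arm0", "arm1"].foldl (fun labels arm =>
      labels ++ [arm ++ "_pos_x", arm ++ "_pos_y", arm ++ "_pos_z",
                 arm ++ "_axis_angle_x", arm ++ "_axis_angle_y", arm ++ "_axis_angle_z",
                 arm ++ "_gripper"]) []
  else
    (PySem.List.pyRange 0 action_dim 1).map (fun i => "dim_" ++ PySem.Int.toStr i)

-- ===== PORT B =====
def pvTable : List (Int × (String × Int)) :=
  [(10, ("rot6d", 1)), (20, ("rot6d", 2)), (7, ("axis_angle", 1)), (14, ("axis_angle", 2))]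

def get_action_labels_alt (action_dim : Int) : List String :=
  match pvTable.lookup action_dim with
  | none => (PySem.List.pyRange 0 action_dim 1).map (fun i => "dim_" ++ PySem.Int.toStr i)
  | some (rotation, num_arms) =>
    let rot_block :=
      if rotation = "rot6d" then (PySem.List.pyRange 0 6 1).map (fun i => "rot_" ++ PySem.Int.toStr i)
      else ["axis_angle_x", "axis_angle_y", "axis_angle_z"]
    let suffixes := ["pos_x", "pos_y", "pos_z"] ++ rot_block ++ ["gripper"]
    if num_arms = 1 then suffixes
    else ["arm0", "arm1"].flatMap (fun arm => suffixes.map (fun s => arm ++ "_" ++ s))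

-- ===== PRECONDITION & SPEC =====
def Spec_get_action_labels (action_dim : Int) (out : List String) : Prop := out = get_action_labels_alt action_dim
instance (action_dim : Int) (out : List String) : Decidable (Spec_get_action_labels action_dim out) := by unfold Spec_get_action_labels; infer_instance

-- ===== CLAIM (what is proved, stated in full; the proofs are below) =====
def Claim_equal_get_action_labels : Prop := ∀ (action_dim : Int), Dom_get_action_labels action_dim → Spec_get_action_labels action_dim (get_action_labels action_dim)

-- ===== LEMMAS AND PROOFS =====

-- ===== VERDICT (by name: the statement is the Claim_ definition above) =====
theorem get_action_labels_spec : Claim_equal_get_action_labels := by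
  intro d _
  unfold Spec_get_action_labels
  by_cases h10 : d = 10
  · subst h10; decide
  by_cases h20 : d = 20
  · subst h20; decide
  by_cases h7 : d = 7
  · subst h7; decide
  by_cases h14 : d = 14
  · subst h14; decide
  have e10 : (d == 10) = false := beq_eq_false_iff_ne.mpr h10
  have e20 : (d == 20) = false := beq_eq_false_iff_ne.mpr h20
  have e7 : (d == 7) = false := beq_eq_false_iff_ne.mpr h7
  have e14 : (d == 14) = false := beq_eq_false_iff_ne.mpr h14
  simp [get_action_labels, get_action_labels_alt, pvTable, List.lookup,
        h10, h20, h7, h14, e10, e20, e7, e14]
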